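-- pv_equiv track=rewrite | github.com/TutiTuti/coding-algorithm | 20230807_s1221_GNS_D3.py | count
-- ===== SOURCE A (Python) =====
-- def count(arr):
--     counting = [0]*10
--     ans = []
--     for i in arr:
--         counting[change[i]] += 1
--
--     for i in range(10):
--         for _ in range(counting[i]):
--             ans.append(key[i])
--
--     return ans
--
-- change = {
--     'ZRO' : 0,
--     'ONE' : 1,
--     'TWO' : 2,
--     'THR' : 3,
--     'FOR' : 4,
--     'FIV' : 5,
--     'SIX' : 6,
--     'SVN' : 7,
--     'EGT' : 8,
--     'NIN' : 9,
-- }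
--
-- key = list(change.keys())
-- ===== SOURCE B (Python) =====
-- # B: decorate-sort-undecorate -- pair each element with its digit, comparison-sort the pairs
-- # by the digit, and strip the decoration; no counting array and no key-table re-emission.
-- change = {
--     'ZRO' : 0,
--     'ONE' : 1,
--     'TWO' : 2,
--     'THR' : 3,
--     'FOR' : 4,
--     'FIV' : 5,
--     'SIX' : 6,
--     'SVN' : 7,
--     'EGT' : 8,
--     'NIN' : 9,
-- }
--
-- def count(arr):
--     decorated = sorted(((change[s], s) for s in arr), key=lambda p: p[0])
--     return [s for _, s in decorated]
-- ===== Notes on version B (the rewrite author's own statement) =====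
-- stated objective: alternative
-- what changed: Replaces the counting array and the key-table re-emission by decorate-sort-undecorate: each element is paired with its digit, the pairs are comparison-sorted on the digit, and the decoration is stripped.
import Mathlib
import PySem

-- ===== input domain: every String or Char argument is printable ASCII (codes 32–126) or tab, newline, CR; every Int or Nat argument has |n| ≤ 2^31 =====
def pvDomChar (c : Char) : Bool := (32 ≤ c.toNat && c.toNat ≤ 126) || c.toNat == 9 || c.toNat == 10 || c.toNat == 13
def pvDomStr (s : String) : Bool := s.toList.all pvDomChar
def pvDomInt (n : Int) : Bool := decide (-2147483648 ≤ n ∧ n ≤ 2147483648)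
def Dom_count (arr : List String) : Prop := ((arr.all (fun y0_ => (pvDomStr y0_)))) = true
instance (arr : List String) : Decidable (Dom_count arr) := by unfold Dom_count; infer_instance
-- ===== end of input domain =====

-- B replaces the counting array and the key-table re-emission by decorate-sort-undecorate:
-- pair each element with its digit, comparison-sort the pairs on the digit, strip the decoration.

-- ===== PORT A =====
-- module constants: change = {...} ; key = list(change.keys())
def pvChange : PySem.Dict String Int :=
  PySem.Dict.ofList [("ZRO",0),("ONE",1),("TWO",2),("THR",3),("FOR",4),("FIV",5),
                     ("SIX",6),("SVN",7),("EGT",8),("NIN",9)]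

def pvKey : List String := pvChange.keys

def count (arr : List String) : List String :=
  -- counting = [0]*10
  let counting : List Int := List.replicate 10 0
  -- for i in arr: counting[change[i]] += 1
  -- (on every admitted input the dict value is an in-range index 0..9, so set/getD are exact there)
  let counting := arr.foldl (fun c s =>
    let j := (PySem.Dict.getD pvChange s 0).toNat
    c.set j (c.getD j 0 + 1)) counting
  -- ans = []; for i in range(10): for _ in range(counting[i]): ans.append(key[i])
  (PySem.List.pyRange 0 10).foldl (fun ans i =>
    (PySem.List.pyRange 0 (PySem.List.pyGetD counting i 0)).foldl
      (fun ans _ => ans ++ [PySem.List.pyGetD pvKey i ""]) ans) ([] : List String)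

-- ===== PORT B =====
def count_alt (arr : List String) : List String :=
  -- decorated = sorted(((change[s], s) for s in arr), key=lambda p: p[0])
  let decorated := PySem.List.sorted (arr.map (fun s => (PySem.Dict.getD pvChange s 0, s))) (fun p => p.1)
  -- return [s for _, s in decorated]
  decorated.map (fun p => p.2)

-- ===== PRECONDITION & SPEC =====
def pvCodes : List String := ["ZRO","ONE","TWO","THR","FOR","FIV","SIX","SVN","EGT","NIN"]

-- Pre_ excludes exactly the inputs containing a string that is not one of the ten digit
-- codes: there A (and B alike) raises KeyError.
def Pre_count (arr : List String) : Prop := (arr.all (fun s => pvCodes.contains s)) = true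
instance (arr : List String) : Decidable (Pre_count arr) := by unfold Pre_count; infer_instance

def pvWitness_count : List String := ["TWO", "ZRO", "NIN", "TWO", "FIV"]

def Spec_count (arr : List String) (out : List String) : Prop := out = count_alt arr
instance (arr : List String) (out : List String) : Decidable (Spec_count arr out) := by unfold Spec_count; infer_instance

-- ===== CLAIM (what is proved, stated in full; the proofs are below) =====
def Claim_equal_count : Prop := ∀ (arr : List String), Dom_count arr → Pre_count arr → Spec_count arr (count arr)

-- ===== LEMMAS AND PROOFS =====

-- A's per-element counting step and its digit index
def pvDig (s : String) : Nat := (PySem.Dict.getD pvChange s 0).toNat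

def pvUpd (c : List Int) (s : String) : List Int :=
  c.set (pvDig s) (c.getD (pvDig s) 0 + 1)

def pvRep (n : Int) (s : String) : List String := List.replicate n.toNat s

-- what A's emission loop produces from the count vector
def pvEmit (cs : List Int) : List String :=
  pvRep (PySem.List.pyGetD cs 0 0) "ZRO" ++ pvRep (PySem.List.pyGetD cs 1 0) "ONE" ++
  pvRep (PySem.List.pyGetD cs 2 0) "TWO" ++ pvRep (PySem.List.pyGetD cs 3 0) "THR" ++
  pvRep (PySem.List.pyGetD cs 4 0) "FOR" ++ pvRep (PySem.List.pyGetD cs 5 0) "FIV" ++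
  pvRep (PySem.List.pyGetD cs 6 0) "SIX" ++ pvRep (PySem.List.pyGetD cs 7 0) "SVN" ++
  pvRep (PySem.List.pyGetD cs 8 0) "EGT" ++ pvRep (PySem.List.pyGetD cs 9 0) "NIN"

theorem pv_foldl_snoc_const {β : Type} (v : String) :
    ∀ (l : List β) (acc : List String),
      l.foldl (fun a _ => a ++ [v]) acc = acc ++ List.replicate l.length v := by
  intro l
  induction l with
  | nil => intro acc; simp
  | cons x xs ih => intro acc; simp [List.foldl, ih, List.replicate_succ]

theorem pv_length_pyRange (n : Int) : (PySem.List.pyRange 0 n).length = n.toNat := by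
  simp [PySem.List.pyRange]
  omega

theorem pv_inner_loop (n : Int) (v : String) (acc : List String) :
    (PySem.List.pyRange 0 n).foldl (fun a _ => a ++ [v]) acc = acc ++ pvRep n v := by
  rw [pv_foldl_snoc_const, pv_length_pyRange]; rfl

theorem pv_count_emit (arr : List String) :
    count arr = pvEmit (arr.foldl pvUpd (List.replicate 10 0)) := by
  unfold count
  rw [show PySem.List.pyRange 0 10 = [0,1,2,3,4,5,6,7,8,9] from by decide]
  simp only [List.foldl_cons, List.foldl_nil, pv_inner_loop]
  rfl

-- membership in pvCodes as a 10-way disjunction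
theorem pv_mem_codes {x : String} (hx : x ∈ pvCodes) :
    x = "ZRO" ∨ x = "ONE" ∨ x = "TWO" ∨ x = "THR" ∨ x = "FOR" ∨
    x = "FIV" ∨ x = "SIX" ∨ x = "SVN" ∨ x = "EGT" ∨ x = "NIN" := by
  simpa [pvCodes] using hx

theorem pv_dig_lt {x : String} (hx : x ∈ pvCodes) : pvDig x < 10 := by
  rcases pv_mem_codes hx with rfl|rfl|rfl|rfl|rfl|rfl|rfl|rfl|rfl|rfl <;> decide

theorem pv_code_iff {x : String} (hx : x ∈ pvCodes) {i : Nat} (hi : i < 10) :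
    ((x == pvCodes.getD i "") = true) ↔ i = pvDig x := by
  rcases pv_mem_codes hx with rfl|rfl|rfl|rfl|rfl|rfl|rfl|rfl|rfl|rfl <;>
    (interval_cases i <;> decide)

theorem pv_getD_set (l : List Int) (i j : Nat) (w : Int) (hj : j < l.length) :
    (l.set j w).getD i 0 = if i = j then w else l.getD i 0 := by
  by_cases h : i = j
  · subst h
    rw [List.getD_eq_getElem _ _ (by simpa using hj)]
    simp [List.getElem_set_self]
  · rcases Nat.lt_or_ge i l.length with h2 | h2
    · rw [List.getD_eq_getElem _ _ (by simpa using h2), List.getD_eq_getElem _ _ h2]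
      rw [List.getElem_set_ne (by omega)]
      rw [if_neg h]
    · rw [List.getD_eq_default _ _ (by simpa using h2), List.getD_eq_default _ _ h2, if_neg h]

theorem pv_upd_length (cs : List Int) (x : String) : (pvUpd cs x).length = cs.length := by
  simp [pvUpd]

theorem pv_getD_upd (cs : List Int) (hlen : cs.length = 10) {x : String} (hx : x ∈ pvCodes)
    {i : Nat} (hi : i < 10) :
    (pvUpd cs x).getD i 0 = cs.getD i 0 + (if x == pvCodes.getD i "" then 1 else 0) := by
  unfold pvUpd
  rw [pv_getD_set cs i (pvDig x) _ (by rw [hlen]; exact pv_dig_lt hx)]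
  by_cases h : i = pvDig x
  · rw [if_pos h, if_pos ((pv_code_iff hx hi).mpr h), h]
  · rw [if_neg h, if_neg (fun hc => h ((pv_code_iff hx hi).mp hc))]
    simp

-- the count vector A builds holds the multiplicities of the ten codes
theorem pv_counts (arr : List String) (harr : ∀ s ∈ arr, s ∈ pvCodes) :
    ∀ (cs : List Int), cs.length = 10 → ∀ i < 10,
      (arr.foldl pvUpd cs).getD i 0 = cs.getD i 0 + (List.count (pvCodes.getD i "") arr : Int) := by
  induction arr with
  | nil => intro cs _ i _; simp
  | cons x rest ih =>
      intro cs hlen i hi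
      have hx : x ∈ pvCodes := harr x (by simp)
      have hrec := ih (fun s hs => harr s (by simp [hs])) (pvUpd cs x)
        (by rw [pv_upd_length, hlen]) i hi
      simp only [List.foldl_cons]
      rw [hrec, pv_getD_upd cs hlen hx hi, List.count_cons]
      by_cases h : (x == pvCodes.getD i "") = true
      · simp only [h, if_true]
        push_cast
        ring
      · simp only [h, Bool.false_eq_true, if_false]
        push_cast
        ring

theorem pv_foldl_upd_length (arr : List String) :
    ∀ (cs : List Int), (arr.foldl pvUpd cs).length = cs.length := by
  induction arr with
  | nil => intro cs; rfl
  | cons x rest ih => intro cs; simp only [List.foldl_cons]; rw [ih, pv_upd_length]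

-- ===== B-side machinery: decorate-sort-undecorate characterised =====
def pvDec (s : String) : Int × String := (PySem.Dict.getD pvChange s 0, s)

def pvLex (p q : Int × String) : Prop := p.1 < q.1 ∨ p = q

def pvTen : List (Int × String) :=
  [(0,"ZRO"),(1,"ONE"),(2,"TWO"),(3,"THR"),(4,"FOR"),(5,"FIV"),(6,"SIX"),(7,"SVN"),(8,"EGT"),(9,"NIN")]

-- the canonical sorted arrangement of the decorated input
def pvTgt (arr : List String) : List (Int × String) :=
  (pvTen.map (fun p => List.replicate (List.count p.2 arr) p)).flatten

theorem pv_lex_antisymm (a b : Int × String) (h1 : pvLex a b) (h2 : pvLex b a) : a = b := by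
  rcases h1 with h1 | h1
  · rcases h2 with h2 | h2
    · exact absurd h1 (by omega)
    · exact h2.symm
  · exact h1

theorem pv_dec_mem_ten {x : String} (hx : x ∈ pvCodes) : pvDec x ∈ pvTen := by
  rcases pv_mem_codes hx with rfl|rfl|rfl|rfl|rfl|rfl|rfl|rfl|rfl|rfl <;> decide

theorem pv_ten_lex : ∀ p ∈ pvTen, ∀ q ∈ pvTen, p.1 ≤ q.1 → pvLex p q := by
  unfold pvLex; decide

theorem pv_dec_injective : Function.Injective pvDec := by
  intro x y h
  exact congrArg Prod.snd h

-- concatenating replicate-chunks whose pairs have strictly increasing digits is pvLex-pairwise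
theorem pv_chunks_pairwise (f : Int × String → Nat) :
    ∀ (ps : List (Int × String)), ps.Pairwise (fun a b => a.1 < b.1) →
      ((ps.map (fun p => List.replicate (f p) p)).flatten).Pairwise pvLex := by
  intro ps
  induction ps with
  | nil => intro _; simp
  | cons p rest ih =>
      intro hp
      simp only [List.map_cons, List.flatten_cons]
      rw [List.pairwise_append]
      refine ⟨List.pairwise_replicate.mpr (Or.inr (Or.inr rfl)), ih (List.Pairwise.of_cons hp), ?_⟩
      intro a ha b hb
      rw [List.eq_of_mem_replicate ha]
      rcases List.mem_flatten.mp hb with ⟨l, hl, hbl⟩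
      rcases List.mem_map.mp hl with ⟨q, hq, rfl⟩
      rw [List.eq_of_mem_replicate hbl]
      exact Or.inl (List.rel_of_pairwise_cons hp hq)

theorem pv_tgt_pairwise (arr : List String) : (pvTgt arr).Pairwise pvLex := by
  exact pv_chunks_pairwise _ pvTen (by decide)

theorem pv_ten_cases {a : Int × String} (ha : a ∈ pvTen) :
    a = (0,"ZRO") ∨ a = (1,"ONE") ∨ a = (2,"TWO") ∨ a = (3,"THR") ∨ a = (4,"FOR") ∨
    a = (5,"FIV") ∨ a = (6,"SIX") ∨ a = (7,"SVN") ∨ a = (8,"EGT") ∨ a = (9,"NIN") := by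
  simpa [pvTen] using ha

theorem pv_mem_decorated {arr : List String} (harr : ∀ s ∈ arr, s ∈ pvCodes)
    {p : Int × String} (hp : p ∈ arr.map pvDec) : p ∈ pvTen := by
  rcases List.mem_map.mp hp with ⟨s, hs, rfl⟩
  exact pv_dec_mem_ten (harr s hs)

theorem pv_count_pair {d : Int} {s : String} (arr : List String) (h : (d, s) = pvDec s) :
    List.count (d, s) (arr.map pvDec) = List.count s arr := by
  rw [h]
  exact List.count_map_of_injective arr pvDec pv_dec_injective s

-- the decorated input is a permutation of its canonical arrangement
theorem pv_perm_tgt (arr : List String) (harr : ∀ s ∈ arr, s ∈ pvCodes) :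
    (arr.map pvDec).Perm (pvTgt arr) := by
  rw [List.perm_iff_count]
  intro a
  by_cases ha : a ∈ pvTen
  · rcases pv_ten_cases ha with rfl|rfl|rfl|rfl|rfl|rfl|rfl|rfl|rfl|rfl
    · rw [pv_count_pair (d := 0) (s := "ZRO") arr (by decide)]
      simp [pvTgt, pvTen, List.count_replicate]
    · rw [pv_count_pair (d := 1) (s := "ONE") arr (by decide)]
      simp [pvTgt, pvTen, List.count_replicate]
    · rw [pv_count_pair (d := 2) (s := "TWO") arr (by decide)]
      simp [pvTgt, pvTen, List.count_replicate]
    · rw [pv_count_pair (d := 3) (s := "THR") arr (by decide)]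
      simp [pvTgt, pvTen, List.count_replicate]
    · rw [pv_count_pair (d := 4) (s := "FOR") arr (by decide)]
      simp [pvTgt, pvTen, List.count_replicate]
    · rw [pv_count_pair (d := 5) (s := "FIV") arr (by decide)]
      simp [pvTgt, pvTen, List.count_replicate]
    · rw [pv_count_pair (d := 6) (s := "SIX") arr (by decide)]
      simp [pvTgt, pvTen, List.count_replicate]
    · rw [pv_count_pair (d := 7) (s := "SVN") arr (by decide)]
      simp [pvTgt, pvTen, List.count_replicate]
    · rw [pv_count_pair (d := 8) (s := "EGT") arr (by decide)]
      simp [pvTgt, pvTen, List.count_replicate]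
    · rw [pv_count_pair (d := 9) (s := "NIN") arr (by decide)]
      simp [pvTgt, pvTen, List.count_replicate]
  · rw [List.count_eq_zero.mpr (fun hmem => ha (pv_mem_decorated harr hmem))]
    symm
    rw [List.count_eq_zero]
    intro hmem
    rcases List.mem_flatten.mp hmem with ⟨l, hl, hal⟩
    rcases List.mem_map.mp hl with ⟨q, hq, rfl⟩
    exact ha (List.eq_of_mem_replicate hal ▸ hq)

-- the sort in B produces exactly the canonical arrangement
theorem pv_sorted_eq_tgt (arr : List String) (harr : ∀ s ∈ arr, s ∈ pvCodes) :
    PySem.List.sorted (arr.map pvDec) (fun p => p.1) = pvTgt arr := by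
  apply List.Perm.eq_of_pairwise (le := pvLex)
  · intro a b _ _ h1 h2
    exact pv_lex_antisymm a b h1 h2
  · have h := PySem.List.sorted_pairwise (arr.map pvDec) (fun p => p.1)
    refine h.imp_of_mem ?_
    intro a b ha hb hab
    have ha' := pv_mem_decorated harr ((PySem.List.mem_sorted _ _ _ a).mp ha)
    have hb' := pv_mem_decorated harr ((PySem.List.mem_sorted _ _ _ b).mp hb)
    exact pv_ten_lex a ha' b hb' hab
  · exact pv_tgt_pairwise arr
  · exact (PySem.List.sorted_perm (arr.map pvDec) (fun p => p.1) false).trans (pv_perm_tgt arr harr)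

-- ===== VERDICT (by name: the statement is the Claim_ definition above) =====
theorem count_spec : Claim_equal_count := by
  intro arr _ hpre
  unfold Spec_count
  have harr : ∀ s ∈ arr, s ∈ pvCodes := by
    intro s hs
    have := List.all_eq_true.mp hpre s hs
    simpa [List.contains_iff_mem] using this
  rw [pv_count_emit]
  set F := arr.foldl pvUpd (List.replicate 10 0) with hF
  have hlenF : F.length = 10 := by rw [hF, pv_foldl_upd_length]; simp
  have hcnt : ∀ i < 10, F.getD i 0 = (List.count (pvCodes.getD i "") arr : Int) := by
    intro i hi
    rw [hF, pv_counts arr harr (List.replicate 10 0) (by simp) i hi]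
    have h0 : (List.replicate 10 (0:Int)).getD i 0 = 0 := by interval_cases i <;> rfl
    rw [h0, zero_add]
  unfold pvEmit
  rw [PySem.List.pyGetD_ofNat' F 0, PySem.List.pyGetD_ofNat' F 1, PySem.List.pyGetD_ofNat' F 2,
      PySem.List.pyGetD_ofNat' F 3, PySem.List.pyGetD_ofNat' F 4, PySem.List.pyGetD_ofNat' F 5,
      PySem.List.pyGetD_ofNat' F 6, PySem.List.pyGetD_ofNat' F 7, PySem.List.pyGetD_ofNat' F 8,
      PySem.List.pyGetD_ofNat' F 9]
  rw [hcnt 0 (by omega), hcnt 1 (by omega), hcnt 2 (by omega), hcnt 3 (by omega),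
      hcnt 4 (by omega), hcnt 5 (by omega), hcnt 6 (by omega), hcnt 7 (by omega),
      hcnt 8 (by omega), hcnt 9 (by omega)]
  show _ = count_alt arr
  unfold count_alt
  rw [show (fun s => (PySem.Dict.getD pvChange s 0, s)) = pvDec from rfl,
      pv_sorted_eq_tgt arr harr]
  simp [pvTgt, pvTen, pvRep, pvCodes, List.append_assoc]
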